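-- pv_equiv track=rewrite | github.com/CSA86/CSA86 | Problem 1002.py | analiza_la_fila
-- ===== SOURCE A (Python) =====
-- def analiza_la_fila(fila, columna):
--     potencial_fila = 0
--     for valor_columna in fila[columna:]:
--         if valor_columna == '.':
--             potencial_fila += 1
--         else:
--             break
--     return potencial_fila
-- ===== SOURCE B (Python) =====
-- def analiza_la_fila(fila, columna):
--     s = fila[columna:]
--     ans = len(s)
--     for i, v in reversed(list(enumerate(s))):
--         if v != '.':
--             ans = i
--     return ans
-- ===== Notes on version B (the rewrite author's own statement) =====
-- stated objective: alternative
-- what changed: B scans the slice back-to-front with no early exit, maintaining the smallest index holding a non-'.' element (defaulting to the slice length), instead of A's forward accumulate-and-break counter loop.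
import Mathlib
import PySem

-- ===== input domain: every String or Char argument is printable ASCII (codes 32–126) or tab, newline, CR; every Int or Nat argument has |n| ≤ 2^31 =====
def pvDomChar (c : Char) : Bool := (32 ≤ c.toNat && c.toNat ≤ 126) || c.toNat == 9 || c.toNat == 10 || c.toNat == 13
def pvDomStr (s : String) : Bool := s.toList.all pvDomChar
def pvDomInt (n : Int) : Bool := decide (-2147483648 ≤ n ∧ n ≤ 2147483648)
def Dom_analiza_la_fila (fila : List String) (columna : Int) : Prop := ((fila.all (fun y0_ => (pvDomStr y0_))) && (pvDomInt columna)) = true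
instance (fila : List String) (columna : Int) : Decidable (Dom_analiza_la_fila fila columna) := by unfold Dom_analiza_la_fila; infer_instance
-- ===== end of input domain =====

-- B replaces A's forward accumulate-and-break counter loop by a full back-to-front scan that
-- maintains the smallest index of a non-'.' element (defaulting to the slice length); same cost.
-- ===== PORT A =====
def pvLoopA : List String → Int → Int
  | [], acc => acc
  | v :: rest, acc => if v == "." then pvLoopA rest (acc + 1) else acc

def analiza_la_fila (fila : List String) (columna : Int) : Int :=
  pvLoopA (PySem.List.slice fila (some columna) none) 0

-- ===== PORT B =====
def analiza_la_fila_alt (fila : List String) (columna : Int) : Int :=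
  let s := PySem.List.slice fila (some columna) none
  (PySem.List.enumerate s 0).reverse.foldl
    (fun ans p => if p.2 != "." then p.1 else ans) (s.length : Int)

-- ===== PRECONDITION & SPEC =====
def Spec_analiza_la_fila (fila : List String) (columna : Int) (out : Int) : Prop := out = analiza_la_fila_alt fila columna
instance (fila : List String) (columna : Int) (out : Int) : Decidable (Spec_analiza_la_fila fila columna out) := by unfold Spec_analiza_la_fila; infer_instance

-- ===== CLAIM =====
def Claim_equal_analiza_la_fila : Prop := ∀ (fila : List String) (columna : Int), Dom_analiza_la_fila fila columna → Spec_analiza_la_fila fila columna (analiza_la_fila fila columna)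

-- ===== LEMMAS AND PROOFS =====
lemma pvLoopA_shift (s : List String) (acc : Int) : pvLoopA s acc = acc + pvLoopA s 0 := by
  induction s generalizing acc with
  | nil => simp [pvLoopA]
  | cons v rest ih =>
    simp only [pvLoopA]
    by_cases h : v == "."
    · simp [h]; rw [ih (acc + 1), ih 1]; ring
    · simp [h]

lemma pvFoldrB (s : List String) (start : Int) :
    (PySem.List.enumerate s start).foldr
      (fun p ans => if p.2 != "." then p.1 else ans) (start + (s.length : Int))
    = start + pvLoopA s 0 := by
  induction s generalizing start with
  | nil => simp [PySem.List.enumerate_nil, pvLoopA]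
  | cons v rest ih =>
    rw [PySem.List.enumerate_cons]
    simp only [List.foldr_cons, List.length_cons]
    have harg : start + ((rest.length + 1 : Nat) : Int) = (start + 1) + (rest.length : Int) := by
      push_cast; ring
    rw [harg, ih (start + 1)]
    by_cases h : v = "."
    · subst h
      simp only [pvLoopA, if_pos (by rfl : ("." == ".") = true), pvLoopA_shift rest (0 + 1)]
      simp; ring
    · simp [pvLoopA, h]

-- ===== VERDICT =====
theorem analiza_la_fila_spec : Claim_equal_analiza_la_fila := by
  intro fila columna _
  unfold Spec_analiza_la_fila analiza_la_fila analiza_la_fila_alt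
  rw [List.foldl_reverse]
  have := pvFoldrB (PySem.List.slice fila (some columna) none) 0
  simpa using this.symm
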